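-- pv_equiv track=rewrite | github.com/mortyc126-debug/SHA | p16_inverse_mitm.py | cascade_3param
-- ===== SOURCE A (Python) =====
-- MASK = 0xFFFFFFFF
--
-- K = [
--     0x428a2f98,0x71374491,0xb5c0fbcf,0xe9b5dba5,0x3956c25b,0x59f111f1,0x923f82a4,0xab1c5ed5,
--     0xd807aa98,0x12835b01,0x243185be,0x550c7dc3,0x72be5d74,0x80deb1fe,0x9bdc06a7,0xc19bf174,
--     0xe49b69c1,0xefbe4786,0x0fc19dc6,0x240ca1cc,0x2de92c6f,0x4a7484aa,0x5cb0a9dc,0x76f988da,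
--     0x983e5152,0xa831c66d,0xb00327c8,0xbf597fc7,0xc6e00bf3,0xd5a79147,0x06ca6351,0x14292967,
--     0x27b70a85,0x2e1b2138,0x4d2c6dfc,0x53380d13,0x650a7354,0x766a0abb,0x81c2c92e,0x92722c85,
--     0xa2bfe8a1,0xa81a664b,0xc24b8b70,0xc76c51a3,0xd192e819,0xd6990624,0xf40e3585,0x106aa070,
--     0x19a4c116,0x1e376c08,0x2748774c,0x34b0bcb5,0x391c0cb3,0x4ed8aa4a,0x5b9cca4f,0x682e6ff3,
--     0x748f82ee,0x78a5636f,0x84c87814,0x8cc70208,0x90befffa,0xa4506ceb,0xbef9a3f7,0xc67178f2,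
-- ]
--
-- H0 = [0x6a09e667,0xbb67ae85,0x3c6ef372,0xa54ff53a,0x510e527f,0x9b05688c,0x1f83d9ab,0x5be0cd19]
--
-- def rotr(x,n): return ((x>>n)|(x<<(32-n)))&MASK
--
-- def sig0(x):  return rotr(x,7)^rotr(x,18)^(x>>3)
--
-- def sig1(x):  return rotr(x,17)^rotr(x,19)^(x>>10)
--
-- def Sig0(x):  return rotr(x,2)^rotr(x,13)^rotr(x,22)
--
-- def Sig1(x):  return rotr(x,6)^rotr(x,11)^rotr(x,25)
--
-- def Ch(e,f,g): return ((e&f)^(~e&g))&MASK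
--
-- def Maj(a,b,c): return (a&b)^(a&c)^(b&c)
--
-- def schedule(W16):
--     W = list(W16)+[0]*48
--     for i in range(16,64): W[i]=(sig1(W[i-2])+W[i-7]+sig0(W[i-15])+W[i-16])&MASK
--     return W
--
-- def sha_r(W, R):
--     a,b,c,d,e,f,g,h = H0
--     tr = [(a,b,c,d,e,f,g,h)]
--     for r in range(R):
--         T1=(h+Sig1(e)+Ch(e,f,g)+K[r]+W[r])&MASK
--         T2=(Sig0(a)+Maj(a,b,c))&MASK
--         h=g;g=f;f=e;e=(d+T1)&MASK;d=c;c=b;b=a;a=(T1+T2)&MASK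
--         tr.append((a,b,c,d,e,f,g,h))
--     return tr
--
-- def cascade_3param(W0, W1):
--     """Стандартный каскад П-13."""
--     Wn=[W0,W1,0]+[0]*13; DWs=[0]*16; DWs[0]=1
--     Wft=[(Wn[i]+DWs[i])&MASK for i in range(16)]
--     sn3 = sha_r(schedule(Wn),3); sf3 = sha_r(schedule(Wft),3)
--     De3n=(sf3[3][4]-sn3[3][4])&MASK; DWs[2]=(-De3n)&MASK
--     for step in range(13):
--         wi=step+3; dt=step+4
--         Wfc=[(Wn[i]+DWs[i])&MASK for i in range(16)]
--         tn=sha_r(schedule(Wn),dt); tf=sha_r(schedule(Wfc),dt)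
--         DWs[wi]=(-(tf[dt][4]-tn[dt][4]))&MASK
--     Wf=[(Wn[i]+DWs[i])&MASK for i in range(16)]
--     sn=schedule(Wn); sf=schedule(Wf)
--     tn17=sha_r(sn,17); tf17=sha_r(sf,17)
--     de17=(tf17[17][4]-tn17[17][4])&MASK
--     return de17, DWs, sn, sf
-- ===== SOURCE B (Python) =====
-- MASK = 0xFFFFFFFF
--
-- K = [
--     0x428a2f98,0x71374491,0xb5c0fbcf,0xe9b5dba5,0x3956c25b,0x59f111f1,0x923f82a4,0xab1c5ed5,
--     0xd807aa98,0x12835b01,0x243185be,0x550c7dc3,0x72be5d74,0x80deb1fe,0x9bdc06a7,0xc19bf174,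
--     0xe49b69c1,
-- ]
--
-- H0 = [0x6a09e667,0xbb67ae85,0x3c6ef372,0xa54ff53a,0x510e527f,0x9b05688c,0x1f83d9ab,0x5be0cd19]
--
-- def rotr(x, n): return ((x >> n) | (x << (32 - n))) & MASK
--
-- def sig0(x): return rotr(x, 7) ^ rotr(x, 18) ^ (x >> 3)
--
-- def sig1(x): return rotr(x, 17) ^ rotr(x, 19) ^ (x >> 10)
--
-- def Sig0(x): return rotr(x, 2) ^ rotr(x, 13) ^ rotr(x, 22)
--
-- def Sig1(x): return rotr(x, 6) ^ rotr(x, 11) ^ rotr(x, 25)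
--
-- def Ch(e, f, g): return ((e & f) ^ (~e & g)) & MASK
--
-- def Maj(a, b, c): return (a & b) ^ (a & c) ^ (b & c)
--
-- def schedule(W16):
--     W = list(W16) + [0] * 48
--     for i in range(16, 64):
--         W[i] = (sig1(W[i - 2]) + W[i - 7] + sig0(W[i - 15]) + W[i - 16]) & MASK
--     return W
--
-- def _round(st, k, w):
--     a, b, c, d, e, f, g, h = st
--     T1 = (h + Sig1(e) + Ch(e, f, g) + k + w) & MASK
--     T2 = (Sig0(a) + Maj(a, b, c)) & MASK
--     return ((T1 + T2) & MASK, a, b, c, (d + T1) & MASK, e, f, g)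
--
-- def _extend(tr, W, upto):
--     """Extend a round trace in place to `upto` rounds, reading message words from W."""
--     for r in range(len(tr) - 1, upto):
--         tr.append(_round(tr[-1], K[r], W[r]))
--
-- def cascade_3param(W0, W1):
--     """Стандартный каскад П-13 (incremental single-trace organisation)."""
--     Wn = [W0, W1, 0] + [0] * 13
--     sn = schedule(Wn)
--     # the normal-side trace is invariant: computed once, indexed everywhere
--     tn = [tuple(H0)]
--     _extend(tn, sn, 17)
--     DWs = [0] * 16; DWs[0] = 1
--     # faucet trace, maintained incrementally: a correction at word wi only
--     # invalidates states past wi, so truncate and roll forward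
--     Wf = [(Wn[i] + DWs[i]) & MASK for i in range(16)]
--     tf = [tuple(H0)]
--     _extend(tf, Wf, 3)
--     DWs[2] = (tn[3][4] - tf[3][4]) & MASK
--     Wf[2] = (Wn[2] + DWs[2]) & MASK
--     del tf[3:]
--     for step in range(13):
--         dt = step + 4; wi = dt - 1
--         _extend(tf, Wf, dt)
--         DWs[wi] = (tn[dt][4] - tf[dt][4]) & MASK
--         Wf[wi] = (Wn[wi] + DWs[wi]) & MASK
--         del tf[wi + 1:]
--     sf = schedule(Wf)
--     _extend(tf, sf, 17)
--     de17 = (tf[17][4] - tn[17][4]) & MASK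
--     return de17, DWs, sn, sf
-- ===== Notes on version B (the rewrite author's own statement) =====
-- stated objective: faster
-- what changed: A recomputes schedule+compression traces from scratch ~16 times (both sides, growing depth); B computes the invariant normal-side trace once as an indexed table and maintains the faucet-side trace incrementally (truncate at the corrected word, roll forward), computing no schedule at all inside the 13-step loop.
import Mathlib
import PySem

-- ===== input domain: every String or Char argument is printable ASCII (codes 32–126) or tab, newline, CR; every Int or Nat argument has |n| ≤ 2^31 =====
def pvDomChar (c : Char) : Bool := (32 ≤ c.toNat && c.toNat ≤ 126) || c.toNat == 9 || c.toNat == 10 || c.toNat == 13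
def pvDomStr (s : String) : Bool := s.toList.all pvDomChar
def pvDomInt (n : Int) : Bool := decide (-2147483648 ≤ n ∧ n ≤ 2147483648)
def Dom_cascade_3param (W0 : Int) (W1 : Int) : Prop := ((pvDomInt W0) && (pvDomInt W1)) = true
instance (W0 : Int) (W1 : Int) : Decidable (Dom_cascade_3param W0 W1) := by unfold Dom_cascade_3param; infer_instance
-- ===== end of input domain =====

-- B replaces A's ~16 from-scratch schedule+trace recomputations by one precomputed
-- normal-side trace table plus an incrementally maintained (truncate-and-roll-forward)
-- faucet trace, intended as a constant-factor speed-up (fewer passes over the same data).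

-- ===== PORT A =====
-- shared module constants/helpers (Source B carries textually identical copies of these)
def pvMASK : Int := 4294967295

def pvK : List Int := [1116352408, 1899447441, 3049323471, 3921009573, 961987163, 1508970993, 2453635748, 2870763221, 3624381080, 310598401, 607225278, 1426881987, 1925078388, 2162078206, 2614888103, 3248222580, 3835390401, 4022224774, 264347078, 604807628, 770255983, 1249150122, 1555081692, 1996064986, 2554220882, 2821834349, 2952996808, 3210313671, 3336571891, 3584528711, 113926993, 338241895, 666307205, 773529912, 1294757372, 1396182291, 1695183700, 1986661051, 2177026350, 2456956037, 2730485921, 2820302411, 3259730800, 3345764771, 3516065817, 3600352804, 4094571909, 275423344, 430227734, 506948616, 659060556, 883997877, 958139571, 1322822218, 1537002063, 1747873779, 1955562222, 2024104815, 2227730452, 2361852424, 2428436474, 2756734187, 3204031479, 3329325298]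

-- an 8-tuple SHA state (a,b,c,d,e,f,g,h)
def PvSt : Type := Int × Int × Int × Int × Int × Int × Int × Int

-- tuple(H0) / the unpacking a,b,…,h = H0
def pvH0st : PvSt := (1779033703, 3144134277, 1013904242, 2773480762, 1359893119, 2600822924, 528734635, 1541459225)

def pvZeroSt : PvSt := (0, 0, 0, 0, 0, 0, 0, 0)

-- tuple index [4] (the e component)
def pvE (st : PvSt) : Int := st.2.2.2.2.1

def pvRotr (x n : Int) : Int :=
  PySem.Int.band (PySem.Int.bor (x >>> n.toNat) (x <<< (32 - n).toNat)) pvMASK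

def pvSig0 (x : Int) : Int := PySem.Int.bxor (PySem.Int.bxor (pvRotr x 7) (pvRotr x 18)) (x >>> (3 : Nat))
def pvSig1 (x : Int) : Int := PySem.Int.bxor (PySem.Int.bxor (pvRotr x 17) (pvRotr x 19)) (x >>> (10 : Nat))
def pvSSig0 (x : Int) : Int := PySem.Int.bxor (PySem.Int.bxor (pvRotr x 2) (pvRotr x 13)) (pvRotr x 22)
def pvSSig1 (x : Int) : Int := PySem.Int.bxor (PySem.Int.bxor (pvRotr x 6) (pvRotr x 11)) (pvRotr x 25)

def pvCh (e f g : Int) : Int :=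
  PySem.Int.band (PySem.Int.bxor (PySem.Int.band e f) (PySem.Int.band (Int.not e) g)) pvMASK

def pvMaj (a b c : Int) : Int :=
  PySem.Int.bxor (PySem.Int.bxor (PySem.Int.band a b) (PySem.Int.band a c)) (PySem.Int.band b c)

def pvSchedule (W16 : List Int) : List Int :=
  (PySem.List.pyRange 16 64 1).foldl
    (fun W i =>
      PySem.List.pySetD W i
        (PySem.Int.band
          (pvSig1 (PySem.List.pyGetD W (i - 2) 0) + PySem.List.pyGetD W (i - 7) 0 +
            pvSig0 (PySem.List.pyGetD W (i - 15) 0) + PySem.List.pyGetD W (i - 16) 0)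
          pvMASK))
    (W16 ++ List.replicate 48 0)

-- sha_r: R compression rounds, returning the trace of states (A only)
def pvShaR (W : List Int) (R : Int) : List PvSt :=
  ((PySem.List.pyRange 0 R 1).foldl
    (fun (p : PvSt × List PvSt) r =>
      match p with
      | ((a, b, c, d, e, f, g, h), tr) =>
        let T1 := PySem.Int.band (h + pvSSig1 e + pvCh e f g + PySem.List.pyGetD pvK r 0 + PySem.List.pyGetD W r 0) pvMASK
        let T2 := PySem.Int.band (pvSSig0 a + pvMaj a b c) pvMASK
        let st : PvSt := (PySem.Int.band (T1 + T2) pvMASK, a, b, c, PySem.Int.band (d + T1) pvMASK, e, f, g)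
        (st, tr ++ [st]))
    (pvH0st, [pvH0st])).2

def cascade_3param (W0 : Int) (W1 : Int) : Int × List Int × List Int × List Int :=
  let Wn : List Int := [W0, W1, 0] ++ List.replicate 13 0
  let DWs0 : List Int := PySem.List.pySetD (List.replicate 16 0) 0 1
  let Wft : List Int := (PySem.List.pyRange 0 16 1).map
    (fun i => PySem.Int.band (PySem.List.pyGetD Wn i 0 + PySem.List.pyGetD DWs0 i 0) pvMASK)
  let sn3 := pvShaR (pvSchedule Wn) 3
  let sf3 := pvShaR (pvSchedule Wft) 3
  let De3n := PySem.Int.band (pvE (PySem.List.pyGetD sf3 3 pvZeroSt) - pvE (PySem.List.pyGetD sn3 3 pvZeroSt)) pvMASK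
  let DWs1 : List Int := PySem.List.pySetD DWs0 2 (PySem.Int.band (-De3n) pvMASK)
  let DWsF : List Int :=
    (PySem.List.pyRange 0 13 1).foldl
      (fun DWs step =>
        let wi := step + 3
        let dt := step + 4
        let Wfc : List Int := (PySem.List.pyRange 0 16 1).map
          (fun i => PySem.Int.band (PySem.List.pyGetD Wn i 0 + PySem.List.pyGetD DWs i 0) pvMASK)
        let tn := pvShaR (pvSchedule Wn) dt
        let tf := pvShaR (pvSchedule Wfc) dt
        PySem.List.pySetD DWs wi
          (PySem.Int.band (-(pvE (PySem.List.pyGetD tf dt pvZeroSt) - pvE (PySem.List.pyGetD tn dt pvZeroSt))) pvMASK))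
      DWs1
  let Wf : List Int := (PySem.List.pyRange 0 16 1).map
    (fun i => PySem.Int.band (PySem.List.pyGetD Wn i 0 + PySem.List.pyGetD DWsF i 0) pvMASK)
  let sn := pvSchedule Wn
  let sf := pvSchedule Wf
  let tn17 := pvShaR sn 17
  let tf17 := pvShaR sf 17
  let de17 := PySem.Int.band (pvE (PySem.List.pyGetD tf17 17 pvZeroSt) - pvE (PySem.List.pyGetD tn17 17 pvZeroSt)) pvMASK
  (de17, DWsF, sn, sf)

-- ===== PORT B =====
-- Source B only carries the first 17 round constants
def pvKB : List Int := [1116352408, 1899447441, 3049323471, 3921009573, 961987163, 1508970993, 2453635748, 2870763221, 3624381080, 310598401, 607225278, 1426881987, 1925078388, 2162078206, 2614888103, 3248222580, 3835390401]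

-- _round
def pvRound (st : PvSt) (k w : Int) : PvSt :=
  match st with
  | (a, b, c, d, e, f, g, h) =>
    let T1 := PySem.Int.band (h + pvSSig1 e + pvCh e f g + k + w) pvMASK
    let T2 := PySem.Int.band (pvSSig0 a + pvMaj a b c) pvMASK
    (PySem.Int.band (T1 + T2) pvMASK, a, b, c, PySem.Int.band (d + T1) pvMASK, e, f, g)

-- _extend (functional rendering of the in-place append loop)
def pvExtend (tr : List PvSt) (W : List Int) (upto : Int) : List PvSt :=
  (PySem.List.pyRange ((tr.length : Int) - 1) upto 1).foldl
    (fun tr r =>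
      tr ++ [pvRound (PySem.List.pyGetD tr (-1) pvZeroSt) (PySem.List.pyGetD pvKB r 0) (PySem.List.pyGetD W r 0)])
    tr

def cascade_3param_alt (W0 : Int) (W1 : Int) : Int × List Int × List Int × List Int :=
  let Wn : List Int := [W0, W1, 0] ++ List.replicate 13 0
  let sn := pvSchedule Wn
  let tn := pvExtend [pvH0st] sn 17
  let DWs0 : List Int := PySem.List.pySetD (List.replicate 16 0) 0 1
  let Wf0 : List Int := (PySem.List.pyRange 0 16 1).map
    (fun i => PySem.Int.band (PySem.List.pyGetD Wn i 0 + PySem.List.pyGetD DWs0 i 0) pvMASK)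
  let tf0 := pvExtend [pvH0st] Wf0 3
  let DWs1 : List Int := PySem.List.pySetD DWs0 2
    (PySem.Int.band (pvE (PySem.List.pyGetD tn 3 pvZeroSt) - pvE (PySem.List.pyGetD tf0 3 pvZeroSt)) pvMASK)
  let Wf1 : List Int := PySem.List.pySetD Wf0 2
    (PySem.Int.band (PySem.List.pyGetD Wn 2 0 + PySem.List.pyGetD DWs1 2 0) pvMASK)
  let tf1 : List PvSt := PySem.List.slice tf0 none (some 3)   -- del tf[3:]
  let fin : List Int × List Int × List PvSt :=
    (PySem.List.pyRange 0 13 1).foldl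
      (fun (st : List Int × List Int × List PvSt) step =>
        match st with
        | (DWs, Wf, tf) =>
          let dt := step + 4
          let wi := dt - 1
          let tf2 := pvExtend tf Wf dt
          let DWs' := PySem.List.pySetD DWs wi
            (PySem.Int.band (pvE (PySem.List.pyGetD tn dt pvZeroSt) - pvE (PySem.List.pyGetD tf2 dt pvZeroSt)) pvMASK)
          let Wf' := PySem.List.pySetD Wf wi
            (PySem.Int.band (PySem.List.pyGetD Wn wi 0 + PySem.List.pyGetD DWs' wi 0) pvMASK)
          let tf3 := PySem.List.slice tf2 none (some (wi + 1))   -- del tf[wi+1:]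
          (DWs', Wf', tf3))
      (DWs1, Wf1, tf1)
  match fin with
  | (DWsF, WfF, tfF) =>
    let sf := pvSchedule WfF
    let tfF2 := pvExtend tfF sf 17
    let de17 := PySem.Int.band (pvE (PySem.List.pyGetD tfF2 17 pvZeroSt) - pvE (PySem.List.pyGetD tn 17 pvZeroSt)) pvMASK
    (de17, DWsF, sn, sf)

-- ===== PRECONDITION & SPEC =====
def Spec_cascade_3param (W0 : Int) (W1 : Int) (out : Int × List Int × List Int × List Int) : Prop := out = cascade_3param_alt W0 W1
instance (W0 : Int) (W1 : Int) (out : Int × List Int × List Int × List Int) : Decidable (Spec_cascade_3param W0 W1 out) := by unfold Spec_cascade_3param; infer_instance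

-- ===== CLAIM (what is proved, stated in full; the proofs are below) =====
def Claim_equal_cascade_3param : Prop := ∀ (W0 : Int) (W1 : Int), Dom_cascade_3param W0 W1 → Spec_cascade_3param W0 W1 (cascade_3param W0 W1)

-- ===== LEMMAS AND PROOFS =====

-- the n-th compression state of message words W (round constants pvK)
def pvStrace (W : List Int) : Nat → PvSt
  | 0 => pvH0st
  | n + 1 => pvRound (pvStrace W n) (pvK.getD n 0) (W.getD n 0)

theorem pvShaR_aux (W : List Int) (R : Nat) :
    ((PySem.List.pyRange 0 (R : Int) 1).foldl
      (fun (p : PvSt × List PvSt) r =>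
        match p with
        | ((a, b, c, d, e, f, g, h), tr) =>
          let T1 := PySem.Int.band (h + pvSSig1 e + pvCh e f g + PySem.List.pyGetD pvK r 0 + PySem.List.pyGetD W r 0) pvMASK
          let T2 := PySem.Int.band (pvSSig0 a + pvMaj a b c) pvMASK
          let st : PvSt := (PySem.Int.band (T1 + T2) pvMASK, a, b, c, PySem.Int.band (d + T1) pvMASK, e, f, g)
          (st, tr ++ [st]))
      (pvH0st, [pvH0st]))
    = (pvStrace W R, (List.range (R + 1)).map (pvStrace W)) := by
  induction R with
  | zero =>
    rw [show ((0 : Nat) : Int) = 0 by norm_num, PySem.List.pyRange_one_eq_nil (by omega)]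
    simp [pvStrace]
  | succ n ih =>
    rw [show ((n + 1 : Nat) : Int) = (n : Int) + 1 by push_cast; ring,
      PySem.List.pyRange_one_succ_right (by positivity), List.foldl_append, ih]
    simp only [List.foldl]
    have hst : pvStrace W (n + 1) =
        pvRound (pvStrace W n) (pvK.getD n 0) (W.getD n 0) := rfl
    rw [List.range_succ (n := n + 1)]
    rcases hP : pvStrace W n with ⟨a, b, c, d, e, f, g, h⟩
    simp [pvRound, hst, hP]

theorem pvShaR_eq (W : List Int) (R : Nat) :
    pvShaR W (R : Int) = (List.range (R + 1)).map (pvStrace W) := by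
  unfold pvShaR
  rw [pvShaR_aux]

theorem pvStrace_congr (W W' : List Int) (n : Nat)
    (h : ∀ j : Nat, j < n → W.getD j 0 = W'.getD j 0) : pvStrace W n = pvStrace W' n := by
  induction n with
  | zero => rfl
  | succ m ih =>
    have h1 : pvStrace W m = pvStrace W' m := ih (fun j hj => h j (by omega))
    show pvRound (pvStrace W m) (pvK.getD m 0) (W.getD m 0) =
      pvRound (pvStrace W' m) (pvK.getD m 0) (W'.getD m 0)
    rw [h1, h m (by omega)]

theorem pvFoldl_set_high_getD (f : List Int → Int → Int) (l : List Int)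
    (hl : ∀ i ∈ l, 16 ≤ i) (j : Nat) (hj : j < 16) :
    ∀ (W : List Int), (l.foldl (fun W i => PySem.List.pySetD W i (f W i)) W).getD j 0 = W.getD j 0 := by
  induction l with
  | nil => intro W; rfl
  | cons i t ih =>
    intro W
    have hi : (16 : Int) ≤ i := hl i (by simp)
    rw [List.foldl_cons, ih (fun x hx => hl x (by simp [hx]))]
    rw [PySem.List.pySetD_of_nonneg _ _ (by omega)]
    unfold List.getD
    rw [List.getElem?_set_ne (by omega)]

theorem pvSchedule_prefix (X : List Int) (j : Nat) (hj : j < 16) :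
    (pvSchedule X).getD j 0 = (X ++ List.replicate 48 0).getD j 0 := by
  unfold pvSchedule
  exact pvFoldl_set_high_getD _ _ (fun i hi => ((PySem.List.mem_pyRange_one).mp hi).1) j hj _

theorem pvExtend_aux (W : List Int) : ∀ (k m : Nat), m + k ≤ 17 →
    ((PySem.List.pyRange (m : Int) ((m + k : Nat) : Int) 1).foldl
      (fun tr r => tr ++ [pvRound (PySem.List.pyGetD tr (-1) pvZeroSt) (PySem.List.pyGetD pvKB r 0) (PySem.List.pyGetD W r 0)])
      ((List.range (m + 1)).map (pvStrace W)))
    = (List.range (m + k + 1)).map (pvStrace W) := by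
  intro k
  induction k with
  | zero =>
    intro m hm
    rw [Nat.add_zero, PySem.List.pyRange_one_eq_nil (by omega)]
    rfl
  | succ k ih =>
    intro m hm
    rw [PySem.List.pyRange_one_cons (by push_cast; omega), List.foldl_cons]
    have hlast : PySem.List.pyGetD ((List.range (m + 1)).map (pvStrace W)) (-1) pvZeroSt = pvStrace W m := by
      rw [List.range_succ, List.map_append]
      exact PySem.List.pyGetD_neg_one_append_singleton _ _ _
    have hK : PySem.List.pyGetD pvKB ((m : Nat) : Int) 0 = pvK.getD m 0 := by
      have h17 : ∀ j : Nat, j < 17 → pvKB.getD j 0 = pvK.getD j 0 := by decide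
      rw [PySem.List.pyGetD_natCast]
      exact h17 m (by omega)
    have hW : PySem.List.pyGetD W ((m : Nat) : Int) 0 = W.getD m 0 := PySem.List.pyGetD_natCast W m 0
    rw [hlast, hK, hW]
    have hnew : (List.range (m + 1)).map (pvStrace W) ++ [pvRound (pvStrace W m) (pvK.getD m 0) (W.getD m 0)]
        = (List.range (m + 1 + 1)).map (pvStrace W) := by
      rw [List.range_succ (n := m + 1), List.map_append]
      rfl
    rw [hnew]
    have h2 := ih (m + 1) (by omega)
    have hc1 : ((m : Int) + 1) = (((m + 1 : Nat)) : Int) := by push_cast; ring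
    have hc2 : ((m + (k + 1) : Nat) : Int) = ((m + 1 + k : Nat) : Int) := by push_cast; ring
    rw [hc1, hc2, h2, show m + 1 + k + 1 = m + (k + 1) + 1 by omega]

theorem pvExtend_eq (W : List Int) (m k : Nat) (hk : m + k ≤ 17) :
    pvExtend ((List.range (m + 1)).map (pvStrace W)) W ((m + k : Nat) : Int) =
      (List.range (m + k + 1)).map (pvStrace W) := by
  unfold pvExtend
  have hlen : (((List.range (m + 1)).map (pvStrace W)).length : Int) - 1 = ((m : Nat) : Int) := by
    simp
  rw [hlen]
  exact pvExtend_aux W k m hk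


-- message-word array actually fed to the compression at the 16-word level
def pvBuild (Wn DWs : List Int) : List Int :=
  (PySem.List.pyRange 0 16 1).map
    (fun i => PySem.Int.band (PySem.List.pyGetD Wn i 0 + PySem.List.pyGetD DWs i 0) pvMASK)

-- the canonical per-step correction both loops compute
def pvStepC (Wn DWs : List Int) (s : Nat) : List Int :=
  DWs.set (s + 3)
    (PySem.Int.band (pvE (pvStrace (pvSchedule Wn) (s + 4)) - pvE (pvStrace (pvBuild Wn DWs) (s + 4))) pvMASK)

theorem pvBuild_length (Wn DWs : List Int) : (pvBuild Wn DWs).length = 16 := by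
  simp [pvBuild, PySem.List.length_pyRange_one]

theorem pvBuild_getD (Wn DWs : List Int) (j : Nat) (hj : j < 16) :
    (pvBuild Wn DWs).getD j 0 = PySem.Int.band (Wn.getD j 0 + DWs.getD j 0) pvMASK := by
  unfold pvBuild
  rw [← PySem.List.pyGetD_natCast]
  rw [show (16 : Int) = ((16 : Nat) : Int) by norm_num]
  rw [PySem.List.pyGetD_map_pyRange _ 16 j 0 hj]
  rw [PySem.List.pyGetD_natCast, PySem.List.pyGetD_natCast]

theorem pvGetD_set_ne (l : List Int) (i j : Nat) (v : Int) (h : i ≠ j) :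
    (l.set i v).getD j 0 = l.getD j 0 := by
  unfold List.getD
  rw [List.getElem?_set_ne h]

theorem pvBuild_set (Wn DWs : List Int) (hD : DWs.length = 16) (w : Nat) (hw : w < 16) (v : Int) :
    (pvBuild Wn DWs).set w (PySem.Int.band (Wn.getD w 0 + v) pvMASK) = pvBuild Wn (DWs.set w v) := by
  apply List.ext_getElem
  · simp [pvBuild_length]
  · intro j hj hj'
    have hj16 : j < 16 := by simpa [pvBuild_length] using hj'
    rw [← List.getD_eq_getElem _ 0 hj, ← List.getD_eq_getElem _ 0 hj']
    by_cases hjw : j = w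
    · subst hjw
      have h1 : ((pvBuild Wn DWs).set j (PySem.Int.band (Wn.getD j 0 + v) pvMASK)).getD j 0
          = PySem.Int.band (Wn.getD j 0 + v) pvMASK := by
        rw [List.getD_eq_getElem _ 0 (by simpa [pvBuild_length] using hj16),
          List.getElem_set_self]
      have h2 : (DWs.set j v).getD j 0 = v := by
        rw [List.getD_eq_getElem _ 0 (by simp [hD]; omega), List.getElem_set_self]
      rw [h1, pvBuild_getD _ _ j hj16, h2]
    · rw [pvGetD_set_ne _ _ _ _ (fun h => hjw h.symm), pvBuild_getD _ _ j hj16,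
        pvBuild_getD _ _ j hj16, pvGetD_set_ne _ _ _ _ (fun h => hjw h.symm)]

theorem pvStrace_schedule (X : List Int) (hX : X.length = 16) (n : Nat) (hn : n ≤ 16) :
    pvStrace (pvSchedule X) n = pvStrace X n := by
  apply pvStrace_congr
  intro j hj
  rw [pvSchedule_prefix X j (by omega)]
  exact List.getD_append X _ 0 j (by omega)

theorem pvMapTrace_congr (W W' : List Int) (n : Nat)
    (h : ∀ j : Nat, j + 1 < n → W.getD j 0 = W'.getD j 0) :
    (List.range n).map (pvStrace W) = (List.range n).map (pvStrace W') := by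
  apply List.map_congr_left
  intro j hj
  exact pvStrace_congr W W' j (fun jw hjw => h jw (by have := List.mem_range.mp hj; omega))

-- both loop bodies compute the canonical correction value
theorem pvAval (Wn DWs : List Int) (s : Nat) (hs : s ≤ 12) :
    PySem.Int.band
      (-(pvE (PySem.List.pyGetD (pvShaR (pvSchedule (pvBuild Wn DWs)) ((s : Int) + 4)) ((s : Int) + 4) pvZeroSt)
        - pvE (PySem.List.pyGetD (pvShaR (pvSchedule Wn) ((s : Int) + 4)) ((s : Int) + 4) pvZeroSt))) pvMASK
    = PySem.Int.band (pvE (pvStrace (pvSchedule Wn) (s + 4)) - pvE (pvStrace (pvBuild Wn DWs) (s + 4))) pvMASK := by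
  have hc : ((s : Int) + 4) = (((s + 4 : Nat)) : Int) := by push_cast; ring
  rw [hc, pvShaR_eq, pvShaR_eq, PySem.List.pyGetD_natCast, PySem.List.pyGetD_natCast,
    PySem.List.getD_map_range _ _ _ _ (by omega), PySem.List.getD_map_range _ _ _ _ (by omega),
    pvStrace_schedule (pvBuild Wn DWs) (pvBuild_length _ _) (s + 4) (by omega), neg_sub]

theorem pvLoopA (Wn : List Int) : ∀ (k s : Nat), s + k = 13 → ∀ (DWs : List Int), DWs.length = 16 →
    (PySem.List.pyRange (s : Int) 13 1).foldl
      (fun DWs step =>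
        let wi := step + 3
        let dt := step + 4
        let Wfc : List Int := (PySem.List.pyRange 0 16 1).map
          (fun i => PySem.Int.band (PySem.List.pyGetD Wn i 0 + PySem.List.pyGetD DWs i 0) pvMASK)
        let tn := pvShaR (pvSchedule Wn) dt
        let tf := pvShaR (pvSchedule Wfc) dt
        PySem.List.pySetD DWs wi
          (PySem.Int.band (-(pvE (PySem.List.pyGetD tf dt pvZeroSt) - pvE (PySem.List.pyGetD tn dt pvZeroSt))) pvMASK))
      DWs
    = (List.range' s k).foldl (pvStepC Wn) DWs := by
  intro k
  induction k with
  | zero =>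
    intro s hs DWs hD
    rw [PySem.List.pyRange_one_eq_nil (a := (s : Int)) (b := 13) (by omega)]
    rfl
  | succ k ih =>
    intro s hs DWs hD
    rw [PySem.List.pyRange_one_cons (by omega : (s : Int) < 13), List.foldl_cons,
      List.range'_succ, List.foldl_cons]
    have h1 : PySem.List.pySetD DWs ((s : Int) + 3)
        (PySem.Int.band
          (-(pvE (PySem.List.pyGetD (pvShaR (pvSchedule (pvBuild Wn DWs)) ((s : Int) + 4)) ((s : Int) + 4) pvZeroSt)
            - pvE (PySem.List.pyGetD (pvShaR (pvSchedule Wn) ((s : Int) + 4)) ((s : Int) + 4) pvZeroSt))) pvMASK)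
        = pvStepC Wn DWs s := by
      rw [pvAval Wn DWs s (by omega),
        show ((s : Int) + 3) = (((s + 3 : Nat)) : Int) by push_cast; ring,
        PySem.List.pySetD_natCast]
      rfl
    have h2 : ((s : Int) + 1) = (((s + 1 : Nat)) : Int) := by push_cast; ring
    show List.foldl _
      (PySem.List.pySetD DWs ((s : Int) + 3)
        (PySem.Int.band
          (-(pvE (PySem.List.pyGetD (pvShaR (pvSchedule (pvBuild Wn DWs)) ((s : Int) + 4)) ((s : Int) + 4) pvZeroSt)
            - pvE (PySem.List.pyGetD (pvShaR (pvSchedule Wn) ((s : Int) + 4)) ((s : Int) + 4) pvZeroSt))) pvMASK))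
      (PySem.List.pyRange ((s : Int) + 1) 13 1) = _
    rw [h1, h2]
    exact ih (s + 1) (by omega) (pvStepC Wn DWs s) (by simp [pvStepC, hD])

theorem pvBval (WfD : List Int) (s : Nat) (hs : s ≤ 12) :
    pvExtend ((List.range (s + 3)).map (pvStrace WfD)) WfD ((s : Int) + 4)
      = (List.range (s + 5)).map (pvStrace WfD) := by
  have hc : ((s : Int) + 4) = (((s + 2) + 2 : Nat) : Int) := by push_cast; ring
  have hr : s + 3 = (s + 2) + 1 := by omega
  rw [hr, hc, pvExtend_eq WfD (s + 2) 2 (by omega), show (s + 2) + 2 + 1 = s + 5 by omega]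

theorem pvStepB (Wn : List Int) (tnT : List PvSt) (DWs : List Int)
    (htn : ∀ d : Nat, d ≤ 17 → PySem.List.pyGetD tnT ((d : Nat) : Int) pvZeroSt = pvStrace (pvSchedule Wn) d)
    (hD : DWs.length = 16) (s : Nat) (hs : s ≤ 12) :
    (PySem.List.pySetD DWs ((s : Int) + 4 - 1)
        (PySem.Int.band
          (pvE (PySem.List.pyGetD tnT ((s : Int) + 4) pvZeroSt)
            - pvE (PySem.List.pyGetD
                (pvExtend ((List.range (s + 3)).map (pvStrace (pvBuild Wn DWs))) (pvBuild Wn DWs) ((s : Int) + 4))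
                ((s : Int) + 4) pvZeroSt)) pvMASK),
      PySem.List.pySetD (pvBuild Wn DWs) ((s : Int) + 4 - 1)
        (PySem.Int.band
          (PySem.List.pyGetD Wn ((s : Int) + 4 - 1) 0
            + PySem.List.pyGetD
                (PySem.List.pySetD DWs ((s : Int) + 4 - 1)
                  (PySem.Int.band
                    (pvE (PySem.List.pyGetD tnT ((s : Int) + 4) pvZeroSt)
                      - pvE (PySem.List.pyGetD
                          (pvExtend ((List.range (s + 3)).map (pvStrace (pvBuild Wn DWs))) (pvBuild Wn DWs) ((s : Int) + 4))
                          ((s : Int) + 4) pvZeroSt)) pvMASK))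
                ((s : Int) + 4 - 1) 0) pvMASK),
      PySem.List.slice
        (pvExtend ((List.range (s + 3)).map (pvStrace (pvBuild Wn DWs))) (pvBuild Wn DWs) ((s : Int) + 4))
        none (some ((s : Int) + 4 - 1 + 1)))
    = (pvStepC Wn DWs s, pvBuild Wn (pvStepC Wn DWs s),
        (List.range (s + 4)).map (pvStrace (pvBuild Wn (pvStepC Wn DWs s)))) := by
  have hc4 : ((s : Int) + 4) = (((s + 4 : Nat)) : Int) := by push_cast; ring
  have hc3 : ((s : Int) + 4 - 1) = (((s + 3 : Nat)) : Int) := by push_cast; ring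
  have e1 := pvBval (pvBuild Wn DWs) s hs
  have e2 : pvE (PySem.List.pyGetD
      (pvExtend ((List.range (s + 3)).map (pvStrace (pvBuild Wn DWs))) (pvBuild Wn DWs) ((s : Int) + 4))
      ((s : Int) + 4) pvZeroSt) = pvE (pvStrace (pvBuild Wn DWs) (s + 4)) := by
    rw [e1, hc4, PySem.List.pyGetD_natCast, PySem.List.getD_map_range _ _ _ _ (by omega)]
  have e3 : pvE (PySem.List.pyGetD tnT ((s : Int) + 4) pvZeroSt)
      = pvE (pvStrace (pvSchedule Wn) (s + 4)) := by
    rw [hc4, htn (s + 4) (by omega)]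
  have eD : PySem.List.pySetD DWs ((s : Int) + 4 - 1)
      (PySem.Int.band
        (pvE (PySem.List.pyGetD tnT ((s : Int) + 4) pvZeroSt)
          - pvE (PySem.List.pyGetD
              (pvExtend ((List.range (s + 3)).map (pvStrace (pvBuild Wn DWs))) (pvBuild Wn DWs) ((s : Int) + 4))
              ((s : Int) + 4) pvZeroSt)) pvMASK)
      = pvStepC Wn DWs s := by
    rw [e2, e3, hc3, PySem.List.pySetD_natCast]
    rfl
  rw [eD]
  have egetv : PySem.List.pyGetD (pvStepC Wn DWs s) ((s : Int) + 4 - 1) 0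
      = PySem.Int.band (pvE (pvStrace (pvSchedule Wn) (s + 4)) - pvE (pvStrace (pvBuild Wn DWs) (s + 4))) pvMASK := by
    rw [hc3, PySem.List.pyGetD_natCast]
    unfold pvStepC
    rw [List.getD_eq_getElem _ 0 (by simp [hD]; omega), List.getElem_set_self]
  have eW : PySem.List.pySetD (pvBuild Wn DWs) ((s : Int) + 4 - 1)
      (PySem.Int.band (PySem.List.pyGetD Wn ((s : Int) + 4 - 1) 0
        + PySem.List.pyGetD (pvStepC Wn DWs s) ((s : Int) + 4 - 1) 0) pvMASK)
      = pvBuild Wn (pvStepC Wn DWs s) := by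
    rw [egetv, hc3, PySem.List.pyGetD_natCast, PySem.List.pySetD_natCast,
      pvBuild_set Wn DWs hD (s + 3) (by omega)]
    rfl
  rw [eW]
  have eT : PySem.List.slice
      (pvExtend ((List.range (s + 3)).map (pvStrace (pvBuild Wn DWs))) (pvBuild Wn DWs) ((s : Int) + 4))
      none (some ((s : Int) + 4 - 1 + 1))
      = (List.range (s + 4)).map (pvStrace (pvBuild Wn (pvStepC Wn DWs s))) := by
    rw [e1, show ((s : Int) + 4 - 1 + 1) = (((s + 4 : Nat)) : Int) by push_cast; ring,
      PySem.List.slice_to_natCast, ← List.map_take, List.take_range,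
      show min (s + 4) (s + 5) = s + 4 by omega]
    apply pvMapTrace_congr
    intro j hj
    rw [pvBuild_getD _ _ j (by omega), pvBuild_getD _ _ j (by omega)]
    unfold pvStepC
    rw [pvGetD_set_ne _ _ _ _ (by omega)]
  rw [eT]

theorem pvLoopB (Wn : List Int) (tnT : List PvSt)
    (htn : ∀ d : Nat, d ≤ 17 → PySem.List.pyGetD tnT ((d : Nat) : Int) pvZeroSt = pvStrace (pvSchedule Wn) d) :
    ∀ (k s : Nat), s + k = 13 → ∀ (DWs : List Int), DWs.length = 16 →
    (PySem.List.pyRange (s : Int) 13 1).foldl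
      (fun (st : List Int × List Int × List PvSt) step =>
        match st with
        | (DWs, Wf, tf) =>
          let dt := step + 4
          let wi := dt - 1
          let tf2 := pvExtend tf Wf dt
          let DWs' := PySem.List.pySetD DWs wi
            (PySem.Int.band (pvE (PySem.List.pyGetD tnT dt pvZeroSt) - pvE (PySem.List.pyGetD tf2 dt pvZeroSt)) pvMASK)
          let Wf' := PySem.List.pySetD Wf wi
            (PySem.Int.band (PySem.List.pyGetD Wn wi 0 + PySem.List.pyGetD DWs' wi 0) pvMASK)
          let tf3 := PySem.List.slice tf2 none (some (wi + 1))
          (DWs', Wf', tf3))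
      (DWs, pvBuild Wn DWs, (List.range (s + 3)).map (pvStrace (pvBuild Wn DWs)))
    = ((List.range' s k).foldl (pvStepC Wn) DWs,
       pvBuild Wn ((List.range' s k).foldl (pvStepC Wn) DWs),
       (List.range (s + k + 3)).map (pvStrace (pvBuild Wn ((List.range' s k).foldl (pvStepC Wn) DWs)))) := by
  intro k
  induction k with
  | zero =>
    intro s hs DWs hD
    rw [PySem.List.pyRange_one_eq_nil (a := (s : Int)) (b := 13) (by omega)]
    rfl
  | succ k ih =>
    intro s hs DWs hD
    rw [PySem.List.pyRange_one_cons (by omega : (s : Int) < 13), List.foldl_cons,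
      List.range'_succ, List.foldl_cons]
    have h2 : ((s : Int) + 1) = (((s + 1 : Nat)) : Int) := by push_cast; ring
    show List.foldl _
      (PySem.List.pySetD DWs ((s : Int) + 4 - 1)
        (PySem.Int.band
          (pvE (PySem.List.pyGetD tnT ((s : Int) + 4) pvZeroSt)
            - pvE (PySem.List.pyGetD
                (pvExtend ((List.range (s + 3)).map (pvStrace (pvBuild Wn DWs))) (pvBuild Wn DWs) ((s : Int) + 4))
                ((s : Int) + 4) pvZeroSt)) pvMASK),
      PySem.List.pySetD (pvBuild Wn DWs) ((s : Int) + 4 - 1)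
        (PySem.Int.band
          (PySem.List.pyGetD Wn ((s : Int) + 4 - 1) 0
            + PySem.List.pyGetD
                (PySem.List.pySetD DWs ((s : Int) + 4 - 1)
                  (PySem.Int.band
                    (pvE (PySem.List.pyGetD tnT ((s : Int) + 4) pvZeroSt)
                      - pvE (PySem.List.pyGetD
                          (pvExtend ((List.range (s + 3)).map (pvStrace (pvBuild Wn DWs))) (pvBuild Wn DWs) ((s : Int) + 4))
                          ((s : Int) + 4) pvZeroSt)) pvMASK))
                ((s : Int) + 4 - 1) 0) pvMASK),
      PySem.List.slice
        (pvExtend ((List.range (s + 3)).map (pvStrace (pvBuild Wn DWs))) (pvBuild Wn DWs) ((s : Int) + 4))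
        none (some ((s : Int) + 4 - 1 + 1)))
      (PySem.List.pyRange ((s : Int) + 1) 13 1) = _
    rw [pvStepB Wn tnT DWs htn hD s (by omega), h2,
      show s + 4 = (s + 1) + 3 by omega]
    have := ih (s + 1) (by omega) (pvStepC Wn DWs s) (by simp [pvStepC, hD])
    rw [this, show s + 1 + k = s + (k + 1) by omega]

theorem pvBand_mask (a : Int) : PySem.Int.band a pvMASK = a % 4294967296 := by
  unfold PySem.Int.band pvMASK
  by_cases h : 0 ≤ a
  · rw [if_pos h, if_pos (by norm_num)]
    have h1 : a.toNat &&& (4294967295 : Int).toNat = a.toNat % 4294967296 := by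
      have h2 := Nat.and_two_pow_sub_one_eq_mod a.toNat 32
      norm_num at h2 ⊢
      exact h2
    rw [h1]
    omega
  · rw [if_neg h, if_pos (by norm_num)]
    have h1 : (4294967295 : Int).toNat &&& (-a - 1).toNat = (-a - 1).toNat % 4294967296 := by
      rw [Nat.land_comm]
      have h2 := Nat.and_two_pow_sub_one_eq_mod (-a - 1).toNat 32
      norm_num at h2 ⊢
      exact h2
    rw [h1]
    omega

theorem pvBand_neg_band (d : Int) :
    PySem.Int.band (-(PySem.Int.band d pvMASK)) pvMASK = PySem.Int.band (-d) pvMASK := by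
  rw [pvBand_mask, pvBand_mask, pvBand_mask]
  omega

theorem pvMaster (Wn : List Int) :
    (let DWs0 : List Int := PySem.List.pySetD (List.replicate 16 0) 0 1
     let Wft : List Int := (PySem.List.pyRange 0 16 1).map
       (fun i => PySem.Int.band (PySem.List.pyGetD Wn i 0 + PySem.List.pyGetD DWs0 i 0) pvMASK)
     let sn3 := pvShaR (pvSchedule Wn) 3
     let sf3 := pvShaR (pvSchedule Wft) 3
     let De3n := PySem.Int.band (pvE (PySem.List.pyGetD sf3 3 pvZeroSt) - pvE (PySem.List.pyGetD sn3 3 pvZeroSt)) pvMASK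
     let DWs1 : List Int := PySem.List.pySetD DWs0 2 (PySem.Int.band (-De3n) pvMASK)
     let DWsF : List Int :=
       (PySem.List.pyRange 0 13 1).foldl
         (fun DWs step =>
           let wi := step + 3
           let dt := step + 4
           let Wfc : List Int := (PySem.List.pyRange 0 16 1).map
             (fun i => PySem.Int.band (PySem.List.pyGetD Wn i 0 + PySem.List.pyGetD DWs i 0) pvMASK)
           let tn := pvShaR (pvSchedule Wn) dt
           let tf := pvShaR (pvSchedule Wfc) dt
           PySem.List.pySetD DWs wi
             (PySem.Int.band (-(pvE (PySem.List.pyGetD tf dt pvZeroSt) - pvE (PySem.List.pyGetD tn dt pvZeroSt))) pvMASK))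
         DWs1
     let Wf : List Int := (PySem.List.pyRange 0 16 1).map
       (fun i => PySem.Int.band (PySem.List.pyGetD Wn i 0 + PySem.List.pyGetD DWsF i 0) pvMASK)
     let sn := pvSchedule Wn
     let sf := pvSchedule Wf
     let tn17 := pvShaR sn 17
     let tf17 := pvShaR sf 17
     let de17 := PySem.Int.band (pvE (PySem.List.pyGetD tf17 17 pvZeroSt) - pvE (PySem.List.pyGetD tn17 17 pvZeroSt)) pvMASK
     (de17, DWsF, sn, sf))
    = (let sn := pvSchedule Wn
       let tn := pvExtend [pvH0st] sn 17
       let DWs0 : List Int := PySem.List.pySetD (List.replicate 16 0) 0 1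
       let Wf0 : List Int := (PySem.List.pyRange 0 16 1).map
         (fun i => PySem.Int.band (PySem.List.pyGetD Wn i 0 + PySem.List.pyGetD DWs0 i 0) pvMASK)
       let tf0 := pvExtend [pvH0st] Wf0 3
       let DWs1 : List Int := PySem.List.pySetD DWs0 2
         (PySem.Int.band (pvE (PySem.List.pyGetD tn 3 pvZeroSt) - pvE (PySem.List.pyGetD tf0 3 pvZeroSt)) pvMASK)
       let Wf1 : List Int := PySem.List.pySetD Wf0 2
         (PySem.Int.band (PySem.List.pyGetD Wn 2 0 + PySem.List.pyGetD DWs1 2 0) pvMASK)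
       let tf1 : List PvSt := PySem.List.slice tf0 none (some 3)
       let fin : List Int × List Int × List PvSt :=
         (PySem.List.pyRange 0 13 1).foldl
           (fun (st : List Int × List Int × List PvSt) step =>
             match st with
             | (DWs, Wf, tf) =>
               let dt := step + 4
               let wi := dt - 1
               let tf2 := pvExtend tf Wf dt
               let DWs' := PySem.List.pySetD DWs wi
                 (PySem.Int.band (pvE (PySem.List.pyGetD tn dt pvZeroSt) - pvE (PySem.List.pyGetD tf2 dt pvZeroSt)) pvMASK)
               let Wf' := PySem.List.pySetD Wf wi
                 (PySem.Int.band (PySem.List.pyGetD Wn wi 0 + PySem.List.pyGetD DWs' wi 0) pvMASK)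
               let tf3 := PySem.List.slice tf2 none (some (wi + 1))
               (DWs', Wf', tf3))
           (DWs1, Wf1, tf1)
       match fin with
       | (DWsF, WfF, tfF) =>
         let sf := pvSchedule WfF
         let tfF2 := pvExtend tfF sf 17
         let de17 := PySem.Int.band (pvE (PySem.List.pyGetD tfF2 17 pvZeroSt) - pvE (PySem.List.pyGetD tn 17 pvZeroSt)) pvMASK
         (de17, DWsF, sn, sf)) := by
  have hb : ∀ D : List Int, (PySem.List.pyRange 0 16 1).map
      (fun i => PySem.Int.band (PySem.List.pyGetD Wn i 0 + PySem.List.pyGetD D i 0) pvMASK) = pvBuild Wn D :=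
    fun D => rfl
  have h1 : pvShaR (pvSchedule Wn) 3 = (List.range 4).map (pvStrace (pvSchedule Wn)) := by
    simpa using pvShaR_eq (pvSchedule Wn) 3
  have h2 : pvShaR (pvSchedule Wn) 17 = (List.range 18).map (pvStrace (pvSchedule Wn)) := by
    simpa using pvShaR_eq (pvSchedule Wn) 17
  have h4 : pvExtend [pvH0st] (pvSchedule Wn) 17 = (List.range 18).map (pvStrace (pvSchedule Wn)) := by
    simpa [pvStrace] using pvExtend_eq (pvSchedule Wn) 0 17 (by omega)
  simp only [hb, h1, h2, h4]
  set D0 : List Int := PySem.List.pySetD (List.replicate 16 0) 0 1 with hD0def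
  have hD0len : D0.length = 16 := by
    rw [hD0def, PySem.List.pySetD_of_nonneg _ _ (by norm_num)]
    simp
  have h3 : pvShaR (pvSchedule (pvBuild Wn D0)) 3
      = (List.range 4).map (pvStrace (pvSchedule (pvBuild Wn D0))) := by
    simpa using pvShaR_eq (pvSchedule (pvBuild Wn D0)) 3
  have h5 : pvExtend [pvH0st] (pvBuild Wn D0) 3
      = (List.range 4).map (pvStrace (pvBuild Wn D0)) := by
    simpa [pvStrace] using pvExtend_eq (pvBuild Wn D0) 0 3 (by omega)
  have gi : ∀ (X : List Int) (n d : Nat), d < n →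
      PySem.List.pyGetD ((List.range n).map (pvStrace X)) ((d : Nat) : Int) pvZeroSt = pvStrace X d := by
    intro X n d hd
    rw [PySem.List.pyGetD_natCast, PySem.List.getD_map_range _ _ _ _ hd]
  have g3n : PySem.List.pyGetD ((List.range 4).map (pvStrace (pvSchedule Wn))) (3 : Int) pvZeroSt
      = pvStrace (pvSchedule Wn) 3 := by
    have := gi (pvSchedule Wn) 4 3 (by omega); exact_mod_cast this
  have g18_3 : PySem.List.pyGetD ((List.range 18).map (pvStrace (pvSchedule Wn))) (3 : Int) pvZeroSt
      = pvStrace (pvSchedule Wn) 3 := by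
    have := gi (pvSchedule Wn) 18 3 (by omega); exact_mod_cast this
  have g18_17 : PySem.List.pyGetD ((List.range 18).map (pvStrace (pvSchedule Wn))) (17 : Int) pvZeroSt
      = pvStrace (pvSchedule Wn) 17 := by
    have := gi (pvSchedule Wn) 18 17 (by omega); exact_mod_cast this
  have hcol : pvStrace (pvSchedule (pvBuild Wn D0)) 3 = pvStrace (pvBuild Wn D0) 3 :=
    pvStrace_schedule _ (pvBuild_length _ _) 3 (by omega)
  have g4_3sf : PySem.List.pyGetD ((List.range 4).map (pvStrace (pvSchedule (pvBuild Wn D0)))) (3 : Int) pvZeroSt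
      = pvStrace (pvBuild Wn D0) 3 := by
    have := gi (pvSchedule (pvBuild Wn D0)) 4 3 (by omega)
    rw [← hcol]; exact_mod_cast this
  have g4_3bf : PySem.List.pyGetD ((List.range 4).map (pvStrace (pvBuild Wn D0))) (3 : Int) pvZeroSt
      = pvStrace (pvBuild Wn D0) 3 := by
    have := gi (pvBuild Wn D0) 4 3 (by omega); exact_mod_cast this
  have hneg : PySem.Int.band
      (-PySem.Int.band (pvE (pvStrace (pvBuild Wn D0) 3) - pvE (pvStrace (pvSchedule Wn) 3)) pvMASK) pvMASK
      = PySem.Int.band (pvE (pvStrace (pvSchedule Wn) 3) - pvE (pvStrace (pvBuild Wn D0) 3)) pvMASK := by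
    rw [pvBand_neg_band, neg_sub]
  simp only [h3, h5, g3n, g18_3, g18_17, g4_3sf, g4_3bf, hneg]
  set D1 : List Int := PySem.List.pySetD D0 2
    (PySem.Int.band (pvE (pvStrace (pvSchedule Wn) 3) - pvE (pvStrace (pvBuild Wn D0) 3)) pvMASK) with hD1def
  have hD1set : D1 = D0.set 2
      (PySem.Int.band (pvE (pvStrace (pvSchedule Wn) 3) - pvE (pvStrace (pvBuild Wn D0) 3)) pvMASK) := by
    rw [hD1def, PySem.List.pySetD_of_nonneg _ _ (by norm_num)]
    rfl
  have hD1len : D1.length = 16 := by rw [hD1set]; simp [hD0len]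
  have hgv : PySem.List.pyGetD D1 (2 : Int) 0
      = PySem.Int.band (pvE (pvStrace (pvSchedule Wn) 3) - pvE (pvStrace (pvBuild Wn D0) 3)) pvMASK := by
    rw [show (2 : Int) = ((2 : Nat) : Int) by norm_num, PySem.List.pyGetD_natCast, hD1set,
      List.getD_eq_getElem _ 0 (by simp [hD0len]), List.getElem_set_self]
  have hWf1 : PySem.List.pySetD (pvBuild Wn D0) (2 : Int)
      (PySem.Int.band (PySem.List.pyGetD Wn (2 : Int) 0 + PySem.List.pyGetD D1 (2 : Int) 0) pvMASK)
      = pvBuild Wn D1 := by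
    rw [hgv, show (2 : Int) = ((2 : Nat) : Int) by norm_num, PySem.List.pyGetD_natCast,
      PySem.List.pySetD_natCast, pvBuild_set Wn D0 hD0len 2 (by omega), ← hD1set]
  have htf1 : PySem.List.slice ((List.range 4).map (pvStrace (pvBuild Wn D0))) none (some (3 : Int))
      = (List.range 3).map (pvStrace (pvBuild Wn D1)) := by
    rw [show (3 : Int) = ((3 : Nat) : Int) by norm_num, PySem.List.slice_to_natCast,
      ← List.map_take, List.take_range, show min 3 4 = 3 by omega]
    apply pvMapTrace_congr
    intro j hj
    rw [pvBuild_getD _ _ j (by omega), pvBuild_getD _ _ j (by omega), hD1set,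
      pvGetD_set_ne _ _ _ _ (by omega)]
  have htnT : ∀ d : Nat, d ≤ 17 →
      PySem.List.pyGetD ((List.range 18).map (pvStrace (pvSchedule Wn))) ((d : Nat) : Int) pvZeroSt
      = pvStrace (pvSchedule Wn) d := fun d hd => gi (pvSchedule Wn) 18 d (by omega)
  have hLA := pvLoopA Wn 13 0 (by omega) D1 hD1len
  have hLB := pvLoopB Wn ((List.range 18).map (pvStrace (pvSchedule Wn))) htnT 13 0 (by omega) D1 hD1len
  push_cast at hLA hLB
  simp only [hb] at hLA hLB
  rw [hWf1, htf1, hLA, hLB]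
  set DF : List Int := List.foldl (pvStepC Wn) D1 (List.range' 0 13) with hDFdef
  dsimp only
  have h6 : pvShaR (pvSchedule (pvBuild Wn DF)) 17
      = (List.range 18).map (pvStrace (pvSchedule (pvBuild Wn DF))) := by
    simpa using pvShaR_eq (pvSchedule (pvBuild Wn DF)) 17
  have g17f : PySem.List.pyGetD ((List.range 18).map (pvStrace (pvSchedule (pvBuild Wn DF)))) (17 : Int) pvZeroSt
      = pvStrace (pvSchedule (pvBuild Wn DF)) 17 := by
    have := gi (pvSchedule (pvBuild Wn DF)) 18 17 (by omega); exact_mod_cast this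
  have htfF : (List.range 16).map (pvStrace (pvBuild Wn DF))
      = (List.range 16).map (pvStrace (pvSchedule (pvBuild Wn DF))) := by
    apply pvMapTrace_congr
    intro j hj
    symm
    rw [pvSchedule_prefix _ j (by omega)]
    exact List.getD_append _ _ 0 j (by rw [pvBuild_length]; omega)
  have hext : pvExtend ((List.range 16).map (pvStrace (pvSchedule (pvBuild Wn DF)))) (pvSchedule (pvBuild Wn DF)) 17
      = (List.range 18).map (pvStrace (pvSchedule (pvBuild Wn DF))) := by
    simpa using pvExtend_eq (pvSchedule (pvBuild Wn DF)) 15 2 (by omega)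
  rw [h6, htfF, hext, g17f]

-- ===== VERDICT (by name: the statement is the Claim_ definition above) =====
theorem cascade_3param_spec : Claim_equal_cascade_3param := by
  intro W0 W1 _
  show cascade_3param W0 W1 = cascade_3param_alt W0 W1
  exact pvMaster ([W0, W1, 0] ++ List.replicate 13 0)
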